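-- pv_equiv track=rewrite | github.com/yvankondjo/SocialSyncAI | backend/app/routers/subscriptions.py | _select_primary_price
-- ===== SOURCE A (Python) =====
-- from typing import List, Optional
--
-- def _select_primary_price(prices: List[dict]) -> Optional[dict]:
--     if not prices:
--         return None
--     recurring_prices = [p for p in prices if (p.get('type') or '').lower() == 'recurring']
--     monthly_prices = [p for p in recurring_prices if (p.get('interval') or '').lower() == 'month']
--     if monthly_prices:
--         return monthly_prices[0]
--     if recurring_prices:
--         return recurring_prices[0]
--     return prices[0]
-- ===== SOURCE B (Python) =====
-- from typing import List, Optional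
--
-- def _select_primary_price(prices: List[dict]) -> Optional[dict]:
--     if not prices:
--         return None
--
--     def rank(p):
--         if (p.get('type') or '').lower() != 'recurring':
--             return 2
--         return 0 if (p.get('interval') or '').lower() == 'month' else 1
--
--     return min(prices, key=rank)
-- ===== Notes on version B (the rewrite author's own statement) =====
-- stated objective: idiomatic
-- what changed: Replaced the two staged filtering comprehensions with a single stable min over a 3-level priority key (0 = monthly recurring, 1 = recurring, 2 = other); Python's min keeps the first element of minimal rank, which matches A's first-of-each-filter choice.
import Mathlib
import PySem

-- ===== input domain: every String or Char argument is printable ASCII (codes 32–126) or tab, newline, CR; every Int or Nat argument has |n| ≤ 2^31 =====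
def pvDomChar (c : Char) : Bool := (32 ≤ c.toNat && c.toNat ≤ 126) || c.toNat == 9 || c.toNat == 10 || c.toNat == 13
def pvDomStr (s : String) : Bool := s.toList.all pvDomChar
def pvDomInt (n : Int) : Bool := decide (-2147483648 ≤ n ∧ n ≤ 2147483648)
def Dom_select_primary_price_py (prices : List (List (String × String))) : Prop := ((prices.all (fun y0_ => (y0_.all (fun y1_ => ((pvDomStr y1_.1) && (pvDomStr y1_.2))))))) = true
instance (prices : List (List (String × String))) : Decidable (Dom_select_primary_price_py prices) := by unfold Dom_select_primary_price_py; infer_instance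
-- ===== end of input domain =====

-- B replaces A's two staged filtering comprehensions with one stable min over a 3-level priority key (alternative decomposition; same return value).

-- ===== PORT A =====
-- p.get(k): first match in the association list ('or '''' is exact via getD "" since Some "" is falsy and yields '' either way)
def pvGet (p : List (String × String)) (k : String) : Option String :=
  (p.find? (fun kv => kv.1 == k)).map (·.2)

def select_primary_price_py (prices : List (List (String × String))) : Option (List (String × String)) :=
  if prices = [] then none
  else
    let recurring_prices := prices.filter (fun p => PySem.Str.lower ((pvGet p "type").getD "") == "recurring")
    let monthly_prices := recurring_prices.filter (fun p => PySem.Str.lower ((pvGet p "interval").getD "") == "month")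
    match monthly_prices with
    | m :: _ => some m
    | [] =>
      match recurring_prices with
      | r :: _ => some r
      | [] => prices[0]?

-- ===== PORT B =====
-- Source B's rank(p): 2 if not recurring, else 0 for monthly, else 1
def priceRank (p : List (String × String)) : Int :=
  if PySem.Str.lower ((pvGet p "type").getD "") != "recurring" then 2
  else if PySem.Str.lower ((pvGet p "interval").getD "") == "month" then 0 else 1

-- min(prices, key=rank) is PySem.List.min? (first minimal element, exactly Python's stable min)
def select_primary_price_py_alt (prices : List (List (String × String))) : Option (List (String × String)) :=
  if prices = [] then none
  else PySem.List.min? prices priceRank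

-- ===== PRECONDITION & SPEC =====
def Spec_select_primary_price_py (prices : List (List (String × String))) (out : Option (List (String × String))) : Prop := out = select_primary_price_py_alt prices
instance (prices : List (List (String × String))) (out : Option (List (String × String))) : Decidable (Spec_select_primary_price_py prices out) := by unfold Spec_select_primary_price_py; infer_instance

-- ===== CLAIM (what is proved, stated in full; the proofs are below) =====
def Claim_equal_select_primary_price_py : Prop := ∀ (prices : List (List (String × String))), Dom_select_primary_price_py prices → Spec_select_primary_price_py prices (select_primary_price_py prices)

-- ===== LEMMAS AND PROOFS =====
def isRec (p : List (String × String)) : Bool := PySem.Str.lower ((pvGet p "type").getD "") == "recurring"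
def isMon (p : List (String × String)) : Bool := PySem.Str.lower ((pvGet p "interval").getD "") == "month"

-- the running-minimum fold underlying min? once the accumulator is occupied
def gMin (b : List (String × String)) (l : List (List (String × String))) : List (String × String) :=
  l.foldl (fun m x => if priceRank x < priceRank m then x else m) b

theorem rank_cases (p : List (String × String)) :
    priceRank p = 0 ∨ priceRank p = 1 ∨ priceRank p = 2 := by
  unfold priceRank; split_ifs <;> simp

theorem mon_rec_bool (x : List (String × String)) :
    (isRec x && isMon x) = (priceRank x == 0) := by
  unfold priceRank isRec isMon
  cases h1 : (PySem.Str.lower ((pvGet x "type").getD "") == "recurring") <;>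
    cases h2 : (PySem.Str.lower ((pvGet x "interval").getD "") == "month") <;>
      simp [h1, bne]

theorem rec_bool (x : List (String × String)) (h : priceRank x ≠ 0) :
    isRec x = (priceRank x == 1) := by
  unfold priceRank isRec at *
  cases h1 : (PySem.Str.lower ((pvGet x "type").getD "") == "recurring") <;>
    cases h2 : (PySem.Str.lower ((pvGet x "interval").getD "") == "month") <;>
      simp [h1, h2, bne] at h ⊢

theorem gMin_rank0 (l : List (List (String × String))) :
    ∀ b, priceRank b = 0 → gMin b l = b := by
  induction l with
  | nil => intro b _; rfl
  | cons x t ih =>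
    intro b hb
    have hx := rank_cases x
    unfold gMin List.foldl
    rw [if_neg (by omega)]
    exact ih b hb

theorem gMin_first0 (l : List (List (String × String))) :
    ∀ b m, priceRank b ≠ 0 →
      (l.filter (fun x => priceRank x == 0)).head? = some m → gMin b l = m := by
  induction l with
  | nil => intro b m _ h; simp at h
  | cons x t ih =>
    intro b m hb h
    have hB := rank_cases b
    rw [List.filter_cons] at h
    by_cases hx : priceRank x = 0
    · rw [if_pos (by simp [hx])] at h
      simp at h
      subst h
      unfold gMin List.foldl
      rw [if_pos (by omega)]
      exact gMin_rank0 t x hx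
    · rw [if_neg (by simp [hx])] at h
      unfold gMin List.foldl
      split
      · exact ih x m hx h
      · exact ih b m hb h

theorem gMin_rank1 (l : List (List (String × String))) :
    ∀ b, (∀ x ∈ l, priceRank x ≠ 0) → priceRank b = 1 → gMin b l = b := by
  induction l with
  | nil => intro b _ _; rfl
  | cons x t ih =>
    intro b h0 hb
    have hx := rank_cases x
    have hx0 : priceRank x ≠ 0 := h0 x (by simp)
    unfold gMin List.foldl
    rw [if_neg (by omega)]
    exact ih b (fun y hy => h0 y (by simp [hy])) hb

theorem gMin_first1 (l : List (List (String × String))) :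
    ∀ b m, (∀ x ∈ l, priceRank x ≠ 0) → priceRank b = 2 →
      (l.filter (fun x => priceRank x == 1)).head? = some m → gMin b l = m := by
  induction l with
  | nil => intro b m _ _ h; simp at h
  | cons x t ih =>
    intro b m h0 hb h
    have hx := rank_cases x
    have hx0 : priceRank x ≠ 0 := h0 x (by simp)
    rw [List.filter_cons] at h
    by_cases hx1 : priceRank x = 1
    · rw [if_pos (by simp [hx1])] at h
      simp at h
      subst h
      unfold gMin List.foldl
      rw [if_pos (by omega)]
      exact gMin_rank1 t x (fun y hy => h0 y (by simp [hy])) hx1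
    · rw [if_neg (by simp [hx1])] at h
      have hx2 : priceRank x = 2 := by omega
      unfold gMin List.foldl
      rw [if_neg (by omega)]
      exact ih b m (fun y hy => h0 y (by simp [hy])) hb h

theorem gMin_all2 (l : List (List (String × String))) :
    ∀ b, (∀ x ∈ l, priceRank x = 2) → priceRank b = 2 → gMin b l = b := by
  induction l with
  | nil => intro b _ _; rfl
  | cons x t ih =>
    intro b h2 hb
    have hx : priceRank x = 2 := h2 x (by simp)
    unfold gMin List.foldl
    rw [if_neg (by omega)]
    exact ih b (fun y hy => h2 y (by simp [hy])) hb

theorem min?_cons (l : List (List (String × String))) :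
    ∀ b, PySem.List.min? (b :: l) priceRank = some (gMin b l) := by
  induction l with
  | nil => intro b; simp [PySem.List.min?, gMin]
  | cons x t ih =>
    intro b
    have h1 := ih x
    have h2 := ih b
    simp only [PySem.List.min?, List.foldl_cons] at h1 h2 ⊢
    by_cases h : priceRank x < priceRank b
    · simp only [gMin, List.foldl_cons, if_pos h]
      simp only [gMin] at h1
      simpa using h1
    · simp only [gMin, List.foldl_cons, if_neg h]
      simp only [gMin] at h2
      simpa [h] using h2

theorem monthly_eq_filter0 (l : List (List (String × String))) :
    (l.filter isRec).filter isMon = l.filter (fun x => priceRank x == 0) := by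
  rw [List.filter_filter]
  exact List.filter_congr (fun x _ => by rw [← mon_rec_bool x, Bool.and_comm])

theorem select_primary_price_py_spec : Claim_equal_select_primary_price_py := by
  intro prices _
  unfold Spec_select_primary_price_py
  unfold select_primary_price_py select_primary_price_py_alt
  rcases prices with _ | ⟨p, rest⟩
  · rfl
  · rw [if_neg (List.cons_ne_nil p rest), if_neg (List.cons_ne_nil p rest), min?_cons]
    simp only [
      show (fun p => PySem.Str.lower ((pvGet p "type").getD "") == "recurring") = isRec from rfl,
      show (fun p => PySem.Str.lower ((pvGet p "interval").getD "") == "month") = isMon from rfl]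
    rw [monthly_eq_filter0]
    rcases rank_cases p with hp | hp | hp
    · -- first element is monthly recurring: both pick p
      rw [List.filter_cons, if_pos (by simp [hp])]
      have hb := gMin_rank0 rest p hp
      simp [hb]
    · -- first element recurring but not monthly
      rw [List.filter_cons, if_neg (by simp [hp])]
      cases hF : rest.filter (fun x => priceRank x == 0) with
      | cons m t =>
        have hb : gMin p rest = m := gMin_first0 rest p m (by omega) (by rw [hF]; rfl)
        simp [hb]
      | nil =>
        have hrec : isRec p = true := by rw [rec_bool p (by omega), hp]; rfl
        have hb : gMin p rest = p := gMin_rank1 rest p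
          (fun x hx => by simpa using List.filter_eq_nil_iff.mp hF x hx) hp
        simp [hrec, hb]
    · -- first element not recurring
      rw [List.filter_cons, if_neg (by simp [hp])]
      cases hF : rest.filter (fun x => priceRank x == 0) with
      | cons m t =>
        have hb : gMin p rest = m := gMin_first0 rest p m (by omega) (by rw [hF]; rfl)
        simp [hb]
      | nil =>
        have h0 : ∀ x ∈ rest, priceRank x ≠ 0 :=
          fun x hx => by simpa using List.filter_eq_nil_iff.mp hF x hx
        have hrecp : isRec p = false := by rw [rec_bool p (by omega), hp]; decide
        have hfe : rest.filter isRec = rest.filter (fun x => priceRank x == 1) :=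
          List.filter_congr (fun x hx => rec_bool x (h0 x hx))
        cases hG : rest.filter (fun x => priceRank x == 1) with
        | cons m t =>
          have hb : gMin p rest = m := gMin_first1 rest p m h0 hp (by rw [hG]; rfl)
          simp [hrecp, hfe, hG, hb]
        | nil =>
          have h2 : ∀ x ∈ rest, priceRank x = 2 := fun x hx => by
            have g1 := List.filter_eq_nil_iff.mp hG x hx
            have g0 := h0 x hx
            rcases rank_cases x with a | a | a <;> simp_all
          have hb := gMin_all2 rest p h2 hp
          simp [hrecp, hfe, hG, hb]
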